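/- GENERATED by tools/from_farm_form.py from prooffarm-gif/accepted/DGifGetScreenDesc.2/Lemmas.lean (a worked proof of the farm's unit `DGifGetScreenDesc.2`,
   accepted by the verdict) — do not edit. -/
import Gif.Spec.Units.DGifGetScreenDesc_2
import Gif.Spec.AllSegs

/-!
  Lemmas for the unit `DGifGetScreenDesc.2` (dgif_lib.c:266-270; a body segment of a PROTECTED function): the segment is walked in
  FOUR STEPS that meet at the return addresses of its two contract calls, with private assertions there.

      sd2_AtRet13      the assertion at 0x1081f6 (`ret13`): `Body` + `r12 = &gif->SColorMap`
      sd2_store_scm    the pure step: storing NULL over the NULL field `gif.SColorMap` keeps `HeapInv`, `GifOK` and `rem`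
      sd2_seg_read     0x10813b … the call of InternalRead … 0x10814d (`ret6`):     `Body at_10813b` → `Body ret6`
      sd2_seg_branch   0x10814d … `cmp eax, 3 ; jne`: 0x108152, or the short-read arm … GifFreeMapObject(NULL) … 0x1081f6 (`ret13`)
      sd2_seg_tail     0x1081f6 … the checked store `SColorMap = NULL`, `r12d = 0` … 0x1080f7: `sd2_AtRet13` → `Done`
-/

open X86 X86.User Asan ProgX.Base ProgX.Base.Spec Gif.Spec

set_option maxRecDepth 4000
set_option maxHeartbeats 4000000

namespace Gif.Spec.DGifGetScreenDesc_2

/-- **At 1081F6H (ret13), `GifFreeMapObject(NULL)` has returned** (dgif_lib.c:268): `Body` (the entry's heap and forest), and `r12`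
still holds `&gif->SColorMap` (`lea r12, [rbx + 0x18]` at 1081E1H; callee-saved). -/
structure sd2_AtRet13 (H : Heap) (rest : List Obj) (frames : List (Nat × FrameLayout)) (F : Forest) (R : Rd) (u₀ e : State)
    (ret : Word) (v : State) : Prop where
  body : DGifGetScreenDesc.Body Gif.L.DGifGetScreenDesc.ret13 H rest frames F R u₀ e ret v
  r12 : v.reg .r12 = e.reg .rdi + 24

/-- **Storing NULL over the NULL field `gif.SColorMap`** (`[gif + 24, gif + 32)`, dgif_lib.c:269) keeps the heap's invariant, the
state invariant FOR THE SAME FOREST (`F.scm = none`: `Shape.set_scm` with `none`, then eta) and the reader's measure. -/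
theorem sd2_store_scm {H : Heap} {rest : List Obj} {frames : List (Nat × FrameLayout)} {F : Forest} {R : Rd} {top : Nat}
    {mem : Mem} (hinv : HeapInv H rest frames top mem) (hok : GifOK H F R mem)
    (hcur : 0x700000 ≤ R.cur ∧ R.cur + 16 ≤ 0x800000) (hbase : H.base = 0x800000) (hscm : F.scm = none)
    (a : Word) (ha : a.toNat = F.gif + 24) :
    HeapInv H rest frames top (mem.writeLE a 8 0) ∧ GifOK H F R (mem.writeLE a 8 0) ∧
      rem R (mem.writeLE a 8 0) = rem R mem := by
  have hgin := hok.owns.inside hinv.heap (o := (F.gif, 120)) List.mem_cons_self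
  simp only at hgin
  have hg1 := hgin.1
  have hg2 := hgin.2.1
  have hlim := hinv.heap.hi
  have hroom := hinv.heap.room
  clear hgin
  have hs : Mem.SameExcept [⟨a.toNat, a.toNat + 8⟩] mem (mem.writeLE a 8 0) :=
    Mem.SameExcept.writeLE _ mem a 8 0 (by omega) ⟨_, List.mem_cons_self, Nat.le_refl _, Nat.le_refl _⟩
  refine ⟨hinv.writeLE_live hok.gif_live a 8 0 (by omega) (by omega), ?_, ?_⟩
  · -- the state invariant: the owned objects are the same, the shape by `Shape.set_scm` with `none`
    have hshape : Shape { F with scm := none } R (mem.writeLE a 8 0) := by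
      apply hok.shape.set_scm (hok.owns.placed hinv.heap) hinv.heap hcur hs
      · intro w hw'
        have e := List.mem_singleton.mp hw'
        rw [e]
        right
        simp only
        omega
      · show GifFileType.SColorMap (mem.writeLE a 8 0) F.gif = 0
        simp only [gfield]
        rw [rd_writeLE_same _ a 8 0 _ ha (by decide)]
    rw [Forest.set_scm_eq hscm] at hshape
    exact ⟨hok.owns, hshape⟩
  · apply rem_sameExcept hs (by omega)
    intro w hw'
    have e := List.mem_singleton.mp hw'
    rw [e]
    simp only
    omega

/-- **10813BH … the call of InternalRead … 10814DH (ret6)** (dgif_lib.c:266 `InternalRead(GifFile, Buf, 3)`). `rsi = &Buf = RA − 88`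
(the frame's object `Buf` at base + 32), `edx = 3`, `rdi = rbx = gif`. -/
theorem sd2_seg_read (Lay : Layout) (hLay : Lay.hi = 0x1000000) (μ : Microarch) (hμ : UserX.MicroOK μ) (u₀ : State)
    (hcode : HasCodeNat Lay u₀ Gif.L.DGifGetScreenDesc.entry Gif.Code.code_DGifGetScreenDesc.nat Gif.L.DGifGetScreenDesc.size)
    (H : Heap) (rest : List Obj) (frames : List (Nat × FrameLayout)) (F : Forest) (R : Rd) (e : State) (ret : Word)
    (h_InternalRead : Calls Lay μ ProgX.Base.WayInv (ProgX.Base.conv u₀) Gif.L.InternalRead.entry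
      (Gif.Spec.InternalRead.spec H rest (DGifGetScreenDesc.framesIn frames e) F R 3))
    (v : State) (hat : DGifGetScreenDesc.Body Gif.L.DGifGetScreenDesc.at_10813b H rest frames F R u₀ e ret v) :
    ReachVia Lay μ ProgX.Base.WayInv v
      (DGifGetScreenDesc.Body Gif.L.DGifGetScreenDesc.ret6 H rest frames F R u₀ e ret) := by
  -- THE PRELUDE: the entry assertion `Body` = `Core` + the heap's invariant + the state invariant
  obtain ⟨hcore, hinv, hok⟩ := hat
  have he := hcore.entry
  v_entry he
  obtain ⟨henv, hrdi, hscm⟩ := hcore.pre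
  have w_rip := hcore.rip
  have c_rsp : v.reg .rsp = e.reg .rsp - 120 := hcore.rsp
  have c_rbx : v.reg .rbx = e.reg .rdi := hcore.rbx
  have w_kept : RegsKept [.rsp] v v := RegsKept.refl _ _
  have w_eq : Mem.EqOn ProgX.Base.L.textLo ProgX.Base.L.textHi u₀.mem v.mem := ProgX.Base.conv_code_eqOn hcore.code
  have hdf := (show abiInv _ from hcore.abi).1
  have hmx := (show abiInv _ from hcore.abi).2
  have hsse := ProgX.Base.sseOK_of_abiInv hcore.abi
  -- the slots and the footprint that `Core` at the exit states again
  have k_r15 : v.mem.readLE (e.reg .rsp - 8) 8 = (e.reg .r15).toNat := hcore.slot_r15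
  have k_r14 : v.mem.readLE (e.reg .rsp - 16) 8 = (e.reg .r14).toNat := hcore.slot_r14
  have k_r13 : v.mem.readLE (e.reg .rsp - 24) 8 = (e.reg .r13).toNat := hcore.slot_r13
  have k_r12 : v.mem.readLE (e.reg .rsp - 32) 8 = (e.reg .r12).toNat := hcore.slot_r12
  have k_rbp : v.mem.readLE (e.reg .rsp - 40) 8 = (e.reg .rbp).toNat := hcore.slot_rbp
  have k_rbx : v.mem.readLE (e.reg .rsp - 48) 8 = (e.reg .rbx).toNat := hcore.slot_rbx
  have k_ra : UInt64.ofNat (v.mem.readLE (e.reg .rsp) 8) = ret := hcore.slot_ra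
  have hsame : Mem.SameExcept
    [⟨(e.reg .rsp).toNat - 400, (e.reg .rsp).toNat⟩,
     shadowSpan ((e.reg .rsp).toNat - 120) ((e.reg .rsp).toNat - 56),
     ⟨0x800000, 0x1000020⟩,
     ⟨R.cur, R.cur + 8⟩] e.mem v.mem := hcore.same
  -- where the cursor and gif are, as numbers
  have hcur := henv.ctx.cursor_range henv.heap.inv.shadow
  have hgin := henv.ok.owns.inside henv.heap.inv.heap (o := (F.gif, 120)) List.mem_cons_self
  have hbase := henv.heap.base
  simp only at hgin
  rw [hbase] at hgin
  have hg1 := hgin.1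
  have hg2 := hgin.2.1
  clear hgin
  -- THE WALK, to the call's return address
  u_walk hcode [hμ.vendor] until [Gif.L.DGifGetScreenDesc.ret6] span [ProgX.Base.L.textLo, ProgX.Base.L.textHi] side (v_side)
  case call_inv =>
    v_inv
  case pre_108148 =>
    -- INTERNALREAD'S PRECONDITION. The environment for the frame list with the own frame in front: only the return address was
    -- pushed since `v`
    have hs : Mem.SameExcept [⟨(e.reg .rsp).toNat - 400, (e.reg .rsp).toNat - 120⟩] v.mem s_108148.mem := by
      rw [w_mem]
      u_same
    have henv' : Env H rest (DGifGetScreenDesc.framesIn frames e) F R s_108148 := by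
      refine henv.at_call hinv hok hs (by omega) (by omega) ?_ ?_ ?_
      · rw [w_rsp]
        u_omega
      · rw [w_rsp]
        u_omega
      · rw [w_rsp]
        u_omega
    -- the buffer is the frame's object `Buf` (`[rsp + 0x20]` = base + 32, 3 bytes), named by its numbers
    have ho : (⟨(e.reg .rsp).toNat - 120 + 32, 3, .stack⟩ : Obj) ∈
        Gif.Frames.DGifGetScreenDesc.objsAt ((e.reg .rsp).toNat - 120) := List.mem_cons_self
    have hsz : Gif.Frames.DGifGetScreenDesc.size = 64 := rfl
    have hb : (e.reg .rsp).toNat - 120 + Gif.Frames.DGifGetScreenDesc.size ≤ (e.reg .rsp).toNat + 8 := by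
      rw [hsz]
      omega
    have hbuf : BufOK H rest (DGifGetScreenDesc.framesIn frames e) F R (s_108148.reg .rsi).toNat 3 := by
      apply BufOK.own henv.heap henv.ctx hinv hb ho
      · rw [w_rsi]
        u_omega
      · rw [w_rsi]
        u_omega
    -- the clauses: `Env`, `rdi = gif`, `edx = 3`, `1 ≤ 3`, `3 < 2 ^ 31`, `BufOK`
    refine ⟨henv', ?_, ?_, by decide, by decide, hbuf⟩
    · rw [w_rdi]
      exact hrdi
    · rw [w_rdx]
      decide
  -- 0x10814d (ret6): INTERNALREAD HAS RETURNED. Its post: `k` bytes delivered (the count is tested by the next walk)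
  obtain ⟨k, hk1, hk2, hk3, hk4, hk5, hback⟩ :
    ReadPost H rest (DGifGetScreenDesc.framesIn frames e) F R 3 s_108148 s_108148r := w_post
  -- the reader at InternalRead's entry is where it was at `v`: only the return address was pushed
  have hs0 : Mem.SameExcept [⟨(e.reg .rsp).toNat - 400, (e.reg .rsp).toNat - 120⟩] v.mem s_108148.mem := by
    rw [w_mem_108148]
    u_same
  have hrem0 : rem R s_108148.mem = rem R v.mem := by
    apply rem_sameExcept hs0 (by omega)
    intro w hw
    have e := List.mem_singleton.mp hw
    rw [e]
    simp only
    omega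
  have e_top : (s_108148.reg .rsp).toNat + 8 = (e.reg .rsp).toNat - 120 := by
    rw [w_rsp_108148]
    u_omega
  -- the callee's footprint in terms of `v` (`w_same : SameExcept […] v.mem s_108148r.mem`)
  v_after_call w_rsp_108148 w_mem_108148
  simp only [w_rsi_108148] at w_same
  -- THE SLOTS AND THE RETURN ADDRESS, over the pushed return address (first step) and through InternalRead's footprint (second
  -- step: the buffer `Buf`, the cursor, the stack below)
  have hp15 : s_108148.mem.readLE (e.reg .rsp - 8) 8 = (e.reg .r15).toNat := by
    rw [w_mem_108148]
    u_frame k_r15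
  rw [w_mem_108148] at hp15
  have hs15 : s_108148r.mem.readLE (e.reg .rsp - 8) 8 = (e.reg .r15).toNat := by u_frame hp15
  have hp14 : s_108148.mem.readLE (e.reg .rsp - 16) 8 = (e.reg .r14).toNat := by
    rw [w_mem_108148]
    u_frame k_r14
  rw [w_mem_108148] at hp14
  have hs14 : s_108148r.mem.readLE (e.reg .rsp - 16) 8 = (e.reg .r14).toNat := by u_frame hp14
  have hp13 : s_108148.mem.readLE (e.reg .rsp - 24) 8 = (e.reg .r13).toNat := by
    rw [w_mem_108148]
    u_frame k_r13
  rw [w_mem_108148] at hp13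
  have hs13 : s_108148r.mem.readLE (e.reg .rsp - 24) 8 = (e.reg .r13).toNat := by u_frame hp13
  have hp12 : s_108148.mem.readLE (e.reg .rsp - 32) 8 = (e.reg .r12).toNat := by
    rw [w_mem_108148]
    u_frame k_r12
  rw [w_mem_108148] at hp12
  have hs12 : s_108148r.mem.readLE (e.reg .rsp - 32) 8 = (e.reg .r12).toNat := by u_frame hp12
  have hpbp : s_108148.mem.readLE (e.reg .rsp - 40) 8 = (e.reg .rbp).toNat := by
    rw [w_mem_108148]
    u_frame k_rbp
  rw [w_mem_108148] at hpbp
  have hsbp : s_108148r.mem.readLE (e.reg .rsp - 40) 8 = (e.reg .rbp).toNat := by u_frame hpbp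
  have hpbx : s_108148.mem.readLE (e.reg .rsp - 48) 8 = (e.reg .rbx).toNat := by
    rw [w_mem_108148]
    u_frame k_rbx
  rw [w_mem_108148] at hpbx
  have hsbx : s_108148r.mem.readLE (e.reg .rsp - 48) 8 = (e.reg .rbx).toNat := by u_frame hpbx
  have hpra : UInt64.ofNat (s_108148.mem.readLE (e.reg .rsp) 8) = ret := by
    rw [w_mem_108148]
    u_frame k_ra
  rw [w_mem_108148] at hpra
  have hsra : UInt64.ofNat (s_108148r.mem.readLE (e.reg .rsp) 8) = ret := by u_frame hpra
  -- the footprint since the entry: InternalRead's windows lie inside the function's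
  have hsame1 : Mem.SameExcept
    [⟨(e.reg .rsp).toNat - 400, (e.reg .rsp).toNat⟩,
     shadowSpan ((e.reg .rsp).toNat - 120) ((e.reg .rsp).toNat - 56),
     ⟨0x800000, 0x1000020⟩,
     ⟨R.cur, R.cur + 8⟩] e.mem s_108148r.mem := by u_same
  -- the heap's invariant comes back with the clean stack at the callee's `rsp + 8` = the body's `rsp`
  have hinv1 : HeapInv H rest (DGifGetScreenDesc.framesIn frames e) ((e.reg .rsp).toNat - 120) s_108148r.mem := by
    rw [← e_top]
    exact hback.inv
  -- THE EXIT ASSERTION: `Body` at `ret6`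
  refine ReachVia.done ?_
  exact {
    core := {
      entry := hcore.entry
      pre := hcore.pre
      rip := w_rip
      rsp := w_rsp
      rbx := (w_kept.get .rbx rfl).trans hcore.rbx
      rbp := (w_kept.get .rbp rfl).trans hcore.rbp
      slot_r15 := hs15
      slot_r14 := hs14
      slot_r13 := hs13
      slot_r12 := hs12
      slot_rbp := hsbp
      slot_rbx := hsbx
      slot_ra := hsra
      rem := by
        refine Nat.le_trans hback.rem ?_
        rw [hrem0]
        exact hcore.rem
      same := hsame1
      code := w_code
      abi := w_inv
    }
    inv := hinv1
    ok := hback.ok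
  }

/-- **10814DH (ret6) … 108152H, or … the call of GifFreeMapObject … 1081F6H (ret13)** (dgif_lib.c:266-268): `cmp eax, 3 ; jne`.
Three bytes: on to 108152H with the same memory. Fewer: the checked store `gif.Error = D_GIF_ERR_READ_FAILED`, `r12 = &gif->SColorMap`,
the checked load of `gif.SColorMap` (NULL: `F.scm = none`), `GifFreeMapObject(NULL)`. -/
theorem sd2_seg_branch (Lay : Layout) (hLay : Lay.hi = 0x1000000) (μ : Microarch) (hμ : UserX.MicroOK μ) (u₀ : State)
    (hcode : HasCodeNat Lay u₀ Gif.L.DGifGetScreenDesc.entry Gif.Code.code_DGifGetScreenDesc.nat Gif.L.DGifGetScreenDesc.size)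
    (H : Heap) (rest : List Obj) (frames : List (Nat × FrameLayout)) (F : Forest) (R : Rd) (e : State) (ret : Word)
    (h_GifFreeMapObject : Calls Lay μ ProgX.Base.WayInv (ProgX.Base.conv u₀) Gif.L.GifFreeMapObject.entry
      (Gif.Spec.GifFreeMapObject.spec H rest (DGifGetScreenDesc.framesIn frames e) 0 0))
    (h_asan_store4_noabort : Asan.SmallCheck Lay μ ProgX.Base.WayInv (ProgX.Base.CodeOK u₀) [.rax, .rcx, .rdx] 4
      ProgX.Base.L.__asan_store4_noabort.entry)
    (h_asan_load8_noabort : Asan.SmallCheck Lay μ ProgX.Base.WayInv (ProgX.Base.CodeOK u₀) [.rax, .rcx, .rdx] 8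
      ProgX.Base.L.__asan_load8_noabort.entry)
    (v : State) (hat : DGifGetScreenDesc.Body Gif.L.DGifGetScreenDesc.ret6 H rest frames F R u₀ e ret v) :
    ReachVia Lay μ ProgX.Base.WayInv v (fun w =>
      DGifGetScreenDesc.Body Gif.L.DGifGetScreenDesc.at_108152 H rest frames F R u₀ e ret w ∨
      sd2_AtRet13 H rest frames F R u₀ e ret w) := by
  -- THE PRELUDE, as in `sd2_seg_read`
  obtain ⟨hcore, hinv, hok⟩ := hat
  have he := hcore.entry
  v_entry he
  obtain ⟨henv, hrdi, hscm⟩ := hcore.pre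
  have w_rip := hcore.rip
  have c_rsp : v.reg .rsp = e.reg .rsp - 120 := hcore.rsp
  have c_rbx : v.reg .rbx = e.reg .rdi := hcore.rbx
  -- `eax` as a variable `z` (the branch fact of `cmp eax, 3` speaks of it)
  obtain ⟨z, c_rax⟩ : ∃ z, v.reg .rax = z := ⟨_, rfl⟩
  have w_kept : RegsKept [.rsp] v v := RegsKept.refl _ _
  have w_eq : Mem.EqOn ProgX.Base.L.textLo ProgX.Base.L.textHi u₀.mem v.mem := ProgX.Base.conv_code_eqOn hcore.code
  have hdf := (show abiInv _ from hcore.abi).1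
  have hmx := (show abiInv _ from hcore.abi).2
  have hsse := ProgX.Base.sseOK_of_abiInv hcore.abi
  have k_r15 : v.mem.readLE (e.reg .rsp - 8) 8 = (e.reg .r15).toNat := hcore.slot_r15
  have k_r14 : v.mem.readLE (e.reg .rsp - 16) 8 = (e.reg .r14).toNat := hcore.slot_r14
  have k_r13 : v.mem.readLE (e.reg .rsp - 24) 8 = (e.reg .r13).toNat := hcore.slot_r13
  have k_r12 : v.mem.readLE (e.reg .rsp - 32) 8 = (e.reg .r12).toNat := hcore.slot_r12
  have k_rbp : v.mem.readLE (e.reg .rsp - 40) 8 = (e.reg .rbp).toNat := hcore.slot_rbp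
  have k_rbx : v.mem.readLE (e.reg .rsp - 48) 8 = (e.reg .rbx).toNat := hcore.slot_rbx
  have k_ra : UInt64.ofNat (v.mem.readLE (e.reg .rsp) 8) = ret := hcore.slot_ra
  have hsame : Mem.SameExcept
    [⟨(e.reg .rsp).toNat - 400, (e.reg .rsp).toNat⟩,
     shadowSpan ((e.reg .rsp).toNat - 120) ((e.reg .rsp).toNat - 56),
     ⟨0x800000, 0x1000020⟩,
     ⟨R.cur, R.cur + 8⟩] e.mem v.mem := hcore.same
  -- where the cursor and gif are, as numbers
  have hcur := henv.ctx.cursor_range henv.heap.inv.shadow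
  have hgin := henv.ok.owns.inside henv.heap.inv.heap (o := (F.gif, 120)) List.mem_cons_self
  have hbase := henv.heap.base
  have hlimit := henv.heap.limit
  have hroom := henv.heap.inv.heap.room
  simp only at hgin
  rw [hbase] at hgin
  rw [hbase, hlimit] at hroom
  have hg1 := hgin.1
  have hg2 := hgin.2.1
  clear hgin
  -- gif is live under the body's frames: what both check goals ask
  have hgl : LiveIn (H.liveObjs ++ rest) (DGifGetScreenDesc.framesIn frames e) F.gif 120 :=
    hok.gif_live.liveIn rest _ (Nat.le_refl _) (Nat.le_refl _)
  -- `gif.SColorMap` is NULL (`F.scm = none`): the load at 1081EDH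
  have l_scm : v.mem.readLE (e.reg .rdi + 24) 8 = 0 := by
    rw [rd_eq_readLE v.mem _ (F.gif + 24) 8 (by u_omega)]
    have hs := hok.shape.scm
    rw [hscm] at hs
    exact hs
  -- the three stores of the short-read arm up to the call of GifFreeMapObject (the check call's return address, `gif.Error`, the
  -- call's return address over the second check call's): the heap's invariant, the state invariant, the reader's measure
  have hstep : HeapInv H rest (DGifGetScreenDesc.framesIn frames e) ((e.reg .rsp).toNat - 120)
        (((v.mem.writeLE (e.reg .rsp - 128) 8 1081818).writeLE (e.reg .rdi + 96) 4 102).writeLE (e.reg .rsp - 128) 8 1081846) ∧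
      GifOK H F R
        (((v.mem.writeLE (e.reg .rsp - 128) 8 1081818).writeLE (e.reg .rdi + 96) 4 102).writeLE (e.reg .rsp - 128) 8 1081846) ∧
      rem R (((v.mem.writeLE (e.reg .rsp - 128) 8 1081818).writeLE (e.reg .rdi + 96) 4 102).writeLE (e.reg .rsp - 128) 8 1081846)
        = rem R v.mem := by
    obtain ⟨hinvA, hokA, hremA⟩ := store_stack hinv hok ⟨hcur.1, hcur.2.1⟩ (e.reg .rsp - 128) 8 1081818
      (by u_omega) (by u_omega)
    obtain ⟨hinvB, hokB, hremB⟩ := store_gif hinvA hokA ⟨hcur.1, hcur.2.1⟩ hbase (e.reg .rdi + 96) 4 102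
      (Or.inr (Or.inr (by u_omega)))
    obtain ⟨hinvC, hokC, hremC⟩ := store_stack hinvB hokB ⟨hcur.1, hcur.2.1⟩ (e.reg .rsp - 128) 8 1081846
      (by u_omega) (by u_omega)
    exact ⟨hinvC, hokC, hremC.trans (hremB.trans hremA)⟩
  -- THE WALK, both arms
  u_walk hcode [hμ.vendor] until [Gif.L.DGifGetScreenDesc.at_108152, Gif.L.DGifGetScreenDesc.ret13]
    span [ProgX.Base.L.textLo, ProgX.Base.L.textHi] side (v_side)
  case check_1081d5 =>
    -- dgif_lib.c:267 the store of `gif.Error`: 4 bytes inside gif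
    have hun : ShadowUntouched v.mem s_1081d5.mem := by v_untouched
    exact hgl.accSmall hinv.shadow hun _ 4 (by decide) (by u_omega) (by u_omega)
  case check_1081e8 =>
    -- dgif_lib.c:268 the load of `gif.SColorMap`: 8 bytes inside gif
    have hun : ShadowUntouched v.mem s_1081e8.mem := by v_untouched
    exact hgl.accSmall hinv.shadow hun _ 8 (by decide) (by u_omega) (by u_omega)
  case call_inv =>
    v_inv
  case pre_1081f1 =>
    -- GIFFREEMAPOBJECT'S PRECONDITION: the heap's invariant at its entry (for the frame list with the own frame in front), `rdi = NULL`
    obtain ⟨hinvC, hokC, hremC⟩ := hstep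
    rw [← w_mem] at hinvC hokC
    have henv' : Env H rest (DGifGetScreenDesc.framesIn frames e) F R s_1081f1 := by
      refine henv.at_call hinvC hokC
        (Mem.SameExcept.refl [⟨(e.reg .rsp).toNat - 400, (e.reg .rsp).toNat - 120⟩] _) (by omega) (by omega) ?_ ?_ ?_
      · rw [w_rsp]
        u_omega
      · rw [w_rsp]
        u_omega
      · rw [w_rsp]
        u_omega
    refine ⟨henv'.heap, Or.inl ?_⟩
    rw [w_rdi]
    rfl
  · -- 0x1081f6 (ret13): GIFFREEMAPOBJECT(NULL) HAS RETURNED. Its post for NULL: the same heap, only stack written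
    obtain ⟨hinvC, hokC, hremC⟩ := hstep
    rw [← w_mem_1081f1] at hinvC hokC hremC
    obtain ⟨hpost0, _⟩ := w_post
    have hz : (s_1081f1.reg .rdi).toNat = 0 := by
      rw [w_rdi_1081f1]
      rfl
    obtain ⟨hinvR, hunR, hstack⟩ := hpost0 hz
    have e_rsp : (s_1081f1.reg .rsp).toNat = (e.reg .rsp).toNat - 128 := by
      rw [w_rsp_1081f1]
      u_omega
    have e_top : (s_1081f1.reg .rsp).toNat + 8 = (e.reg .rsp).toNat - 120 := by
      rw [e_rsp]
      omega
    -- the heap's invariant comes back with the clean stack at the callee's `rsp + 8` = the body's `rsp`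
    have hinv1 : HeapInv H rest (DGifGetScreenDesc.framesIn frames e) ((e.reg .rsp).toNat - 120) s_1081f1r.mem := by
      rw [← e_top]
      exact hinvR
    -- the state invariant and the measure through the callee's 48 bytes of stack
    have hok1 : GifOK H F R s_1081f1r.mem := by
      apply hokC.sameExcept hinvC.heap ⟨hcur.1, hcur.2.1⟩ hstack
      intro w hw
      have e := List.mem_singleton.mp hw
      rw [e, e_rsp]
      apply Loose.stack hinvC.heap
      · simp only
        omega
      · simp only
        omega
      · simp only
        omega
    have hrem1 : rem R s_1081f1r.mem = rem R v.mem := by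
      rw [← hremC]
      apply rem_sameExcept hstack (by omega)
      intro w hw
      have e := List.mem_singleton.mp hw
      rw [e, e_rsp]
      simp only
      omega
    -- the callee's footprint is what its post for NULL says: its own stack (the contract's footprint has ghost windows)
    clear w_same
    have w_same := hstack
    rw [w_rsp_1081f1, w_mem_1081f1] at w_same
    -- THE SLOTS AND THE RETURN ADDRESS, over the three stores (first step) and through GifFreeMapObject's stack (second step)
    have hp15 : s_1081f1.mem.readLE (e.reg .rsp - 8) 8 = (e.reg .r15).toNat := by
      rw [w_mem_1081f1]
      u_frame k_r15
    rw [w_mem_1081f1] at hp15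
    have hs15 : s_1081f1r.mem.readLE (e.reg .rsp - 8) 8 = (e.reg .r15).toNat := by u_frame hp15
    have hp14 : s_1081f1.mem.readLE (e.reg .rsp - 16) 8 = (e.reg .r14).toNat := by
      rw [w_mem_1081f1]
      u_frame k_r14
    rw [w_mem_1081f1] at hp14
    have hs14 : s_1081f1r.mem.readLE (e.reg .rsp - 16) 8 = (e.reg .r14).toNat := by u_frame hp14
    have hp13 : s_1081f1.mem.readLE (e.reg .rsp - 24) 8 = (e.reg .r13).toNat := by
      rw [w_mem_1081f1]
      u_frame k_r13
    rw [w_mem_1081f1] at hp13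
    have hs13 : s_1081f1r.mem.readLE (e.reg .rsp - 24) 8 = (e.reg .r13).toNat := by u_frame hp13
    have hp12 : s_1081f1.mem.readLE (e.reg .rsp - 32) 8 = (e.reg .r12).toNat := by
      rw [w_mem_1081f1]
      u_frame k_r12
    rw [w_mem_1081f1] at hp12
    have hs12 : s_1081f1r.mem.readLE (e.reg .rsp - 32) 8 = (e.reg .r12).toNat := by u_frame hp12
    have hpbp : s_1081f1.mem.readLE (e.reg .rsp - 40) 8 = (e.reg .rbp).toNat := by
      rw [w_mem_1081f1]
      u_frame k_rbp
    rw [w_mem_1081f1] at hpbp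
    have hsbp : s_1081f1r.mem.readLE (e.reg .rsp - 40) 8 = (e.reg .rbp).toNat := by u_frame hpbp
    have hpbx : s_1081f1.mem.readLE (e.reg .rsp - 48) 8 = (e.reg .rbx).toNat := by
      rw [w_mem_1081f1]
      u_frame k_rbx
    rw [w_mem_1081f1] at hpbx
    have hsbx : s_1081f1r.mem.readLE (e.reg .rsp - 48) 8 = (e.reg .rbx).toNat := by u_frame hpbx
    have hpra : UInt64.ofNat (s_1081f1.mem.readLE (e.reg .rsp) 8) = ret := by
      rw [w_mem_1081f1]
      u_frame k_ra
    rw [w_mem_1081f1] at hpra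
    have hsra : UInt64.ofNat (s_1081f1r.mem.readLE (e.reg .rsp) 8) = ret := by u_frame hpra
    -- the footprint since the entry
    have hsame1 : Mem.SameExcept
      [⟨(e.reg .rsp).toNat - 400, (e.reg .rsp).toNat⟩,
       shadowSpan ((e.reg .rsp).toNat - 120) ((e.reg .rsp).toNat - 56),
       ⟨0x800000, 0x1000020⟩,
       ⟨R.cur, R.cur + 8⟩] e.mem s_1081f1r.mem := by u_same
    -- THE EXIT ASSERTION: `Body` at `ret13`, and `r12 = &gif->SColorMap`
    refine ReachVia.done (Or.inr ?_)
    exact {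
      body := {
        core := {
          entry := hcore.entry
          pre := hcore.pre
          rip := w_rip
          rsp := w_rsp
          rbx := (w_kept.get .rbx rfl).trans hcore.rbx
          rbp := (w_kept.get .rbp rfl).trans hcore.rbp
          slot_r15 := hs15
          slot_r14 := hs14
          slot_r13 := hs13
          slot_r12 := hs12
          slot_rbp := hsbp
          slot_rbx := hsbx
          slot_ra := hsra
          rem := by
            rw [hrem1]
            exact hcore.rem
          same := hsame1
          code := w_code
          abi := w_inv
        }
        inv := hinv1
        ok := hok1
      }
      r12 := w_r12
    }
  · -- 0x108152: three bytes were read; nothing was stored since `ret6`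
    refine ReachVia.done (Or.inl ?_)
    exact {
      core := {
        entry := hcore.entry
        pre := hcore.pre
        rip := w_rip
        rsp := w_rsp
        rbx := (w_kept.get .rbx rfl).trans hcore.rbx
        rbp := (w_kept.get .rbp rfl).trans hcore.rbp
        slot_r15 := by
          rw [w_mem]
          exact k_r15
        slot_r14 := by
          rw [w_mem]
          exact k_r14
        slot_r13 := by
          rw [w_mem]
          exact k_r13
        slot_r12 := by
          rw [w_mem]
          exact k_r12
        slot_rbp := by
          rw [w_mem]
          exact k_rbp
        slot_rbx := by
          rw [w_mem]
          exact k_rbx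
        slot_ra := by
          rw [w_mem]
          exact k_ra
        rem := by
          rw [w_mem]
          exact hcore.rem
        same := by
          rw [w_mem]
          exact hsame
        code := ProgX.Base.conv_code_in w_eq
        abi := by
          refine ProgX.Base.abiInv_of ?_ ?_
          · rw [w_flags]
            simp only [X86.User.df_setStatus]
            exact hdf
          · rw [w_mxcsr]
            exact hmx
      }
      inv := by
        rw [w_mem]
        exact hinv
      ok := by
        rw [w_mem]
        exact hok
    }

/-- **1081F6H (ret13) … 1080F7H** (dgif_lib.c:269-270): the checked store `gif.SColorMap = NULL` (over NULL: `sd2_store_scm`),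
`r12d = 0` (GIF_ERROR), the jump to the epilogue: `Done` with the entry's heap and forest. -/
theorem sd2_seg_tail (Lay : Layout) (hLay : Lay.hi = 0x1000000) (μ : Microarch) (hμ : UserX.MicroOK μ) (u₀ : State)
    (hcode : HasCodeNat Lay u₀ Gif.L.DGifGetScreenDesc.entry Gif.Code.code_DGifGetScreenDesc.nat Gif.L.DGifGetScreenDesc.size)
    (H : Heap) (rest : List Obj) (frames : List (Nat × FrameLayout)) (F : Forest) (R : Rd) (e : State) (ret : Word)
    (h_asan_store8_noabort : Asan.SmallCheck Lay μ ProgX.Base.WayInv (ProgX.Base.CodeOK u₀) [.rax, .rcx, .rdx] 8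
      ProgX.Base.L.__asan_store8_noabort.entry)
    (v : State) (hat : sd2_AtRet13 H rest frames F R u₀ e ret v) :
    ReachVia Lay μ ProgX.Base.WayInv v (DGifGetScreenDesc.Done H rest frames F R H F u₀ e ret) := by
  -- THE PRELUDE, as in `sd2_seg_read`
  obtain ⟨⟨hcore, hinv, hok⟩, c_r12⟩ := hat
  have he := hcore.entry
  v_entry he
  obtain ⟨henv, hrdi, hscm⟩ := hcore.pre
  have w_rip := hcore.rip
  have c_rsp : v.reg .rsp = e.reg .rsp - 120 := hcore.rsp
  have c_rbx : v.reg .rbx = e.reg .rdi := hcore.rbx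
  have w_kept : RegsKept [.rsp] v v := RegsKept.refl _ _
  have w_eq : Mem.EqOn ProgX.Base.L.textLo ProgX.Base.L.textHi u₀.mem v.mem := ProgX.Base.conv_code_eqOn hcore.code
  have hdf := (show abiInv _ from hcore.abi).1
  have hmx := (show abiInv _ from hcore.abi).2
  have hsse := ProgX.Base.sseOK_of_abiInv hcore.abi
  have k_r15 : v.mem.readLE (e.reg .rsp - 8) 8 = (e.reg .r15).toNat := hcore.slot_r15
  have k_r14 : v.mem.readLE (e.reg .rsp - 16) 8 = (e.reg .r14).toNat := hcore.slot_r14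
  have k_r13 : v.mem.readLE (e.reg .rsp - 24) 8 = (e.reg .r13).toNat := hcore.slot_r13
  have k_r12 : v.mem.readLE (e.reg .rsp - 32) 8 = (e.reg .r12).toNat := hcore.slot_r12
  have k_rbp : v.mem.readLE (e.reg .rsp - 40) 8 = (e.reg .rbp).toNat := hcore.slot_rbp
  have k_rbx : v.mem.readLE (e.reg .rsp - 48) 8 = (e.reg .rbx).toNat := hcore.slot_rbx
  have k_ra : UInt64.ofNat (v.mem.readLE (e.reg .rsp) 8) = ret := hcore.slot_ra
  have hsame : Mem.SameExcept
    [⟨(e.reg .rsp).toNat - 400, (e.reg .rsp).toNat⟩,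
     shadowSpan ((e.reg .rsp).toNat - 120) ((e.reg .rsp).toNat - 56),
     ⟨0x800000, 0x1000020⟩,
     ⟨R.cur, R.cur + 8⟩] e.mem v.mem := hcore.same
  -- where the cursor and gif are, as numbers
  have hcur := henv.ctx.cursor_range henv.heap.inv.shadow
  have hgin := henv.ok.owns.inside henv.heap.inv.heap (o := (F.gif, 120)) List.mem_cons_self
  have hbase := henv.heap.base
  have hlimit := henv.heap.limit
  have hroom := henv.heap.inv.heap.room
  simp only at hgin
  rw [hbase] at hgin
  rw [hbase, hlimit] at hroom
  have hg1 := hgin.1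
  have hg2 := hgin.2.1
  clear hgin
  -- gif is live under the body's frames: what the check goal asks
  have hgl : LiveIn (H.liveObjs ++ rest) (DGifGetScreenDesc.framesIn frames e) F.gif 120 :=
    hok.gif_live.liveIn rest _ (Nat.le_refl _) (Nat.le_refl _)
  -- THE WALK, to the epilogue's first instruction
  u_walk hcode [hμ.vendor] until [Gif.L.DGifGetScreenDesc.at_1080f7]
    span [ProgX.Base.L.textLo, ProgX.Base.L.textHi] side (v_side)
  case check_1081f9 =>
    -- dgif_lib.c:269 the store of `gif.SColorMap`: 8 bytes inside gif
    have hun : ShadowUntouched v.mem s_1081f9.mem := by v_untouched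
    exact hgl.accSmall hinv.shadow hun _ 8 (by decide) (by u_omega) (by u_omega)
  -- 0x1080f7 FROM 0x10820c: `gif.SColorMap = NULL` stored, r12 = 0
  -- the two stores since `v`: the check call's return address (stack), then `gif.SColorMap` (NULL over NULL)
  obtain ⟨hinvA, hokA, hremA⟩ := store_stack hinv hok ⟨hcur.1, hcur.2.1⟩ (e.reg .rsp - 128) 8 1081854
    (by u_omega) (by u_omega)
  obtain ⟨hinvB, hokB, hremB⟩ := sd2_store_scm hinvA hokA ⟨hcur.1, hcur.2.1⟩ hbase hscm (e.reg .rdi + 24) (by u_omega)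
  rw [← w_mem] at hinvB hokB hremB
  have hremF : rem R s_10820c.mem = rem R v.mem := hremB.trans hremA
  -- THE EXIT ASSERTION: `Done` for the entry's heap and forest, GIF_ERROR
  have hr12 : (s_10820c.reg .r12).toNat = 0 := by
    rw [w_r12]
    decide
  refine ReachVia.done ?_
  exact {
    core := {
      entry := hcore.entry
      pre := hcore.pre
      rip := w_rip
      rsp := w_rsp
      rbx := (w_kept.get .rbx rfl).trans hcore.rbx
      rbp := (w_kept.get .rbp rfl).trans hcore.rbp
      slot_r15 := by
        rw [w_mem]
        u_frame k_r15
      slot_r14 := by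
        rw [w_mem]
        u_frame k_r14
      slot_r13 := by
        rw [w_mem]
        u_frame k_r13
      slot_r12 := by
        rw [w_mem]
        u_frame k_r12
      slot_rbp := by
        rw [w_mem]
        u_frame k_rbp
      slot_rbx := by
        rw [w_mem]
        u_frame k_rbx
      slot_ra := by
        rw [w_mem]
        u_frame k_ra
      rem := by
        rw [hremF]
        exact hcore.rem
      same := by
        rw [w_mem]
        u_same
      code := ProgX.Base.conv_code_in w_eq
      abi := by
        refine ProgX.Base.abiInv_of ?_ ?_
        · rw [w_flags]
          exact w_df_1081f9
        · rw [w_mxcsr]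
          exact hmx
    }
    region := SameRegion.refl H
    sameBut := Forest.SameButScm.refl F
    inv := hinvB
    ok := hokB
    res := Or.inr hr12
    err := fun _ => hscm
  }

end Gif.Spec.DGifGetScreenDesc_2
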